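-- pv_equiv track=rewrite | github.com/Sinan-Esencan/Python-Programming-MOOC-2025 | part05-07_sudoku_grid.py | row_correct
-- ===== SOURCE A (Python) =====
-- def row_correct(sudoku: list, row_no: int):
--     repeated = []
--     for square in sudoku[row_no]:
--         if square != 0 and square in repeated:
--             return False
--         elif square != 0:
--             repeated.append(square)
--     return True
-- ===== SOURCE B (Python) =====
-- def row_correct(sudoku: list, row_no: int):
--     filtered = [square for square in sudoku[row_no] if square != 0]
--     return len(filtered) == len(set(filtered))
-- ===== Notes on version B (the rewrite author's own statement) =====
-- stated objective: idiomatic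
-- what changed: Replaces the incremental 'repeated' accumulator with its per-element membership test and early return by collecting the nonzero entries once and comparing the list's length with the length of its deduplicated set.
import Mathlib
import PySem

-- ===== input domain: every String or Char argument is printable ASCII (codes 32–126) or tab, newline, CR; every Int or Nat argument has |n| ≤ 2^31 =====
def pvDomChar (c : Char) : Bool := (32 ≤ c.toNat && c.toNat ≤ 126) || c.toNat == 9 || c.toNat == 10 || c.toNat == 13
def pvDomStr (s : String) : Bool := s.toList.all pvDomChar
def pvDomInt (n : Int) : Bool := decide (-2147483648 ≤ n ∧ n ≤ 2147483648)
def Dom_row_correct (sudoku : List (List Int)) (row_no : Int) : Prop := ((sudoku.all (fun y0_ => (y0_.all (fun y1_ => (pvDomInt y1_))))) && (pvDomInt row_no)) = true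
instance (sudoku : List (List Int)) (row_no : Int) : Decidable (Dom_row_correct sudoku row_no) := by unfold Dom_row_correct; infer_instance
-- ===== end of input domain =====

-- B drops A's incremental 'repeated' accumulator with early return in favour of
-- collecting the nonzero entries once and comparing length with deduplicated length (idiomatic).

-- ===== PORT A =====
-- the 'for square in sudoku[row_no]' loop with its 'repeated' accumulator
def rcLoop : List Int → List Int → Bool
  | [], _ => true
  | square :: rest, repeated =>
    if square ≠ 0 ∧ repeated.contains square then false
    else if square ≠ 0 then rcLoop rest (repeated ++ [square])
    else rcLoop rest repeated

def row_correct (sudoku : List (List Int)) (row_no : Int) : Bool :=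
  rcLoop (PySem.List.pyGetD sudoku row_no []) []

-- ===== PORT B =====
def row_correct_alt (sudoku : List (List Int)) (row_no : Int) : Bool :=
  let filtered := (PySem.List.pyGetD sudoku row_no []).filter (fun square => decide (square ≠ 0))
  decide (filtered.length = (PySem.Set.ofList filtered).length)

-- ===== PRECONDITION & SPEC =====
-- Pre_ excludes exactly the inputs where Python raises IndexError on sudoku[row_no] (both A and B raise there).
def Pre_row_correct (sudoku : List (List Int)) (row_no : Int) : Prop :=
  PySem.Raise.InRange sudoku.length row_no
instance (sudoku : List (List Int)) (row_no : Int) : Decidable (Pre_row_correct sudoku row_no) := by unfold Pre_row_correct; infer_instance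

def pvWitness_row_correct : List (List Int) × Int := ([[1, 2, 0, 2]], 0)

def Spec_row_correct (sudoku : List (List Int)) (row_no : Int) (out : Bool) : Prop := out = row_correct_alt sudoku row_no
instance (sudoku : List (List Int)) (row_no : Int) (out : Bool) : Decidable (Spec_row_correct sudoku row_no out) := by unfold Spec_row_correct; infer_instance

-- ===== CLAIM (what is proved, stated in full; the proofs are below) =====
def Claim_equal_row_correct : Prop := ∀ (sudoku : List (List Int)) (row_no : Int), Dom_row_correct sudoku row_no → Pre_row_correct sudoku row_no → Spec_row_correct sudoku row_no (row_correct sudoku row_no)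

-- ===== LEMMAS AND PROOFS =====

-- A's loop returns true iff the nonzero entries seen are distinct and none was already in 'repeated'
theorem rcLoop_iff (xs : List Int) : ∀ (rep : List Int),
    rcLoop xs rep = true ↔
      ((xs.filter (fun square => decide (square ≠ 0))).Nodup ∧
       ∀ a ∈ xs.filter (fun square => decide (square ≠ 0)), a ∉ rep) := by
  induction xs with
  | nil => intro rep; simp [rcLoop]
  | cons x xs ih =>
    intro rep
    by_cases hx : x = 0
    · subst hx; simp [rcLoop, ih]
    · by_cases hm : x ∈ rep
      · simp [rcLoop, hx, hm]
      · simp only [rcLoop, hx, hm, List.contains_iff_mem, if_neg, if_pos,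
          ne_eq, not_false_eq_true, true_and]
        rw [ih, List.filter_cons_of_pos (by simpa using hx)]
        constructor
        · rintro ⟨hnd, hall⟩
          have hx' : ∀ a ∈ List.filter (fun square => decide (square ≠ 0)) xs, a ∉ rep ∧ a ≠ x := by
            intro a ha
            have := hall a ha
            simp only [List.mem_append, List.mem_singleton, not_or] at this
            exact this
          exact ⟨List.nodup_cons.2 ⟨fun hxf => (hx' x hxf).2 rfl, hnd⟩,
            fun a ha => by
              rcases List.mem_cons.1 ha with h | h
              · exact h ▸ hm
              · exact (hx' a h).1⟩
        · rintro ⟨hnd, hall⟩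
          rcases List.nodup_cons.1 hnd with ⟨hxf, hnd'⟩
          refine ⟨hnd', fun a ha => ?_⟩
          simp only [List.mem_append, List.mem_singleton, not_or]
          exact ⟨hall a (List.mem_cons_of_mem _ ha), fun he => hxf (he ▸ ha)⟩

-- set(xs) has the same length as xs exactly when xs has no duplicates
theorem ofList_length_eq_iff (xs : List Int) :
    (PySem.Set.ofList xs).length = xs.length ↔ xs.Nodup := by
  constructor
  · intro h
    by_contra hnd
    have hlt : (PySem.Set.ofList xs).length < xs.length := by
      clear h
      induction xs with
      | nil => simp at hnd
      | cons x xs ih =>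
        rw [PySem.Set.ofList_cons]
        simp only [List.nodup_cons, not_and_or, not_not] at hnd
        rcases hnd with hmem | hnd
        · have hx : x ∈ PySem.Set.ofList xs := by
            rw [PySem.Set.mem_ofList]; exact hmem
          have : ((PySem.Set.ofList xs).discard x).length < (PySem.Set.ofList xs).length := by
            unfold PySem.Set.discard
            refine List.length_filter_lt_length_iff_exists.2 ⟨x, hx, by simp⟩
          have := PySem.Set.length_ofList_le xs
          simp only [List.length_cons]
          omega
        · have h1 := ih hnd
          have h2 : ((PySem.Set.ofList xs).discard x).length ≤ (PySem.Set.ofList xs).length :=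
            List.length_filter_le _ _
          simp only [List.length_cons]
          omega
    omega
  · intro h; rw [PySem.Set.ofList_eq_self_of_nodup xs h]

-- ===== VERDICT (by name: the statement is the Claim_ definition above) =====
theorem row_correct_spec : Claim_equal_row_correct := by
  intro sudoku row_no _ _
  unfold Spec_row_correct row_correct row_correct_alt
  rw [Bool.eq_iff_iff, rcLoop_iff]
  simp only [List.not_mem_nil, not_false_eq_true, implies_true, and_true, decide_eq_true_eq]
  rw [← ofList_length_eq_iff]
  exact eq_comm
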